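-- pv_equiv track=rewrite | github.com/mrjgsantos/deals | app/services/personalization.py | _title_tokens
-- ===== SOURCE A (Python) =====
-- TITLE_STOPWORDS = {
--     "and",
--     "con",
--     "de",
--     "del",
--     "el",
--     "en",
--     "for",
--     "la",
--     "los",
--     "para",
--     "the",
--     "un",
--     "una",
--     "y",
-- }
--
-- def _title_tokens(value: str) -> set[str]:
--     cleaned = []
--     token = []
--     for char in value.lower():
--         if char.isalnum():
--             token.append(char)
--             continue
--         if token:
--             cleaned.append("".join(token))
--             token.clear()
--     if token:
--         cleaned.append("".join(token))
--     return {item for item in cleaned if len(item) >= 3 and item not in TITLE_STOPWORDS}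
-- ===== SOURCE B (Python) =====
-- TITLE_STOPWORDS = {
--     "and", "con", "de", "del", "el", "en", "for",
--     "la", "los", "para", "the", "un", "una", "y",
-- }
--
--
-- def _title_tokens(value: str) -> set[str]:
--     s = value.lower()
--     n = len(s)
--     tokens = []
--     i = 0
--     while i < n:
--         if s[i].isalnum():
--             j = i
--             while j < n and s[j].isalnum():
--                 j += 1
--             tokens.append(s[i:j])
--             i = j
--         else:
--             i += 1
--     return {t for t in tokens if len(t) >= 3 and t not in TITLE_STOPWORDS}
-- ===== Notes on version B (the rewrite author's own statement) =====
-- stated objective: alternative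
-- what changed: Replaces A's per-character accumulator loop with trailing flush by a span scan that finds each maximal alphanumeric run at once and slices it out; same final filtering into a set.
import Mathlib
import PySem

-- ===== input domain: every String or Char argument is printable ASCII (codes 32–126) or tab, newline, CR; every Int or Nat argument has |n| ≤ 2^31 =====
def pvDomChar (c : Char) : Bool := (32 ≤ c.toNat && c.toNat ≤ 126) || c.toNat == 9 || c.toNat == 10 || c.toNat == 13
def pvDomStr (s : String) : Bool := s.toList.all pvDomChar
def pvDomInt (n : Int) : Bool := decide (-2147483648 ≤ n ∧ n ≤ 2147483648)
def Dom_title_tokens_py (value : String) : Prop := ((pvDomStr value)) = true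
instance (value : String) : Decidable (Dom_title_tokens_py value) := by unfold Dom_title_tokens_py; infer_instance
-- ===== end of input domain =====

-- B finds maximal alphanumeric runs by a span scan (slice out whole runs) instead of A's
-- char-by-char token buffer with a trailing flush; same filtering into the same set.

-- shared module constant TITLE_STOPWORDS (tokens are built as char lists)
def titleStopwords : List (List Char) :=
  ["and", "con", "de", "del", "el", "en", "for",
   "la", "los", "para", "the", "un", "una", "y"].map String.toList

-- the filter of the final set comprehension (identical text in both Pythons)
def keepToken (t : List Char) : Bool :=
  decide (3 ≤ t.length) && !(titleStopwords.contains t)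

-- ===== PORT A =====
-- loop body: alnum → extend token; else flush token (if nonempty) into cleaned
def aStep (st : List (List Char) × List Char) (c : Char) : List (List Char) × List Char :=
  if PySem.Chars.isalnum c then (st.1, st.2 ++ [c])
  else if st.2.isEmpty then st else (st.1 ++ [st.2], [])

-- the trailing 'if token: cleaned.append(...)' after the loop
def flushA (st : List (List Char) × List Char) : List (List Char) :=
  if st.2.isEmpty then st.1 else st.1 ++ [st.2]

def title_tokens_py (value : String) : List String :=
  let cleaned := flushA ((PySem.Chars.lower value.toList).foldl aStep ([], []))
  (PySem.Set.ofList (cleaned.filter keepToken)).map String.mk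

-- ===== PORT B =====
-- Source B's outer while: skip a non-alnum char, or take the whole alnum run s[i:j] and jump to j
def splitAlnum : List Char → List (List Char)
  | [] => []
  | c :: cs =>
    if PySem.Chars.isalnum c then
      (c :: cs).takeWhile PySem.Chars.isalnum :: splitAlnum ((c :: cs).dropWhile PySem.Chars.isalnum)
    else splitAlnum cs
  termination_by l => l.length
  decreasing_by
    · rename_i h
      simp only [List.dropWhile_cons, h, if_pos]
      exact Nat.lt_succ_of_le (List.length_dropWhile_le _ _)
    · simp

def title_tokens_py_alt (value : String) : List String :=
  let toks := splitAlnum (PySem.Chars.lower value.toList)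
  (PySem.Set.ofList (toks.filter keepToken)).map String.mk

-- ===== PRECONDITION & SPEC =====
def Spec_title_tokens_py (value : String) (out : List String) : Prop := out = title_tokens_py_alt value
instance (value : String) (out : List String) : Decidable (Spec_title_tokens_py value out) := by unfold Spec_title_tokens_py; infer_instance

-- ===== CLAIM (what is proved, stated in full; the proofs are below) =====
def Claim_equal_title_tokens_py : Prop := ∀ (value : String), Dom_title_tokens_py value → Spec_title_tokens_py value (title_tokens_py value)

-- ===== LEMMAS AND PROOFS =====

-- functional description of A's loop followed by the trailing flush
def scanA (tok : List Char) : List Char → List (List Char)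
  | [] => if tok.isEmpty then [] else [tok]
  | c :: cs =>
    if PySem.Chars.isalnum c then scanA (tok ++ [c]) cs
    else (if tok.isEmpty then [] else [tok]) ++ scanA [] cs

lemma foldl_aStep (cs : List Char) : ∀ acc tok,
    flushA (cs.foldl aStep (acc, tok)) = acc ++ scanA tok cs := by
  induction cs with
  | nil => intro acc tok; by_cases h : tok.isEmpty <;> simp [scanA, flushA, h]
  | cons c cs ih =>
    intro acc tok
    simp only [List.foldl_cons, scanA, aStep]
    by_cases h : PySem.Chars.isalnum c
    · simp [h, ih]
    · by_cases ht : tok.isEmpty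
      · have : tok = [] := by simpa using ht
        simp [h, ih, this]
      · simp [h, ht, ih]

lemma scanA_eq (cs : List Char) : ∀ tok, (∀ c ∈ tok, PySem.Chars.isalnum c = true) →
    scanA tok cs = splitAlnum (tok ++ cs) := by
  induction cs with
  | nil =>
    intro tok htok
    cases tok with
    | nil => simp [scanA, splitAlnum]
    | cons t ts =>
      have hts : ∀ x ∈ ts, PySem.Chars.isalnum x = true :=
        fun x hx => htok x (List.mem_cons_of_mem _ hx)
      rw [List.append_nil, splitAlnum]
      simp only [htok t (by simp), if_pos]
      rw [show (t :: ts).takeWhile PySem.Chars.isalnum = t :: ts from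
            List.takeWhile_eq_self_iff.mpr htok,
          show (t :: ts).dropWhile PySem.Chars.isalnum = [] from
            List.dropWhile_eq_nil_iff.mpr (fun x hx => htok x hx)]
      simp [scanA, splitAlnum]
  | cons c cs ih =>
    intro tok htok
    by_cases h : PySem.Chars.isalnum c
    · have hstep := ih (tok ++ [c]) (by
        intro x hx
        rcases List.mem_append.1 hx with h' | h'
        · exact htok x h'
        · simp at h'; subst h'; exact h)
      simp only [scanA, h, if_pos, hstep, List.append_assoc, List.cons_append, List.nil_append]
    · cases tok with
      | nil =>
        rw [List.nil_append, show splitAlnum (c :: cs) = splitAlnum cs by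
              rw [splitAlnum]; simp [h]]
        simp [scanA, h, ih [] (by simp)]
      | cons t ts =>
        have hts : ∀ x ∈ ts, PySem.Chars.isalnum x = true :=
          fun x hx => htok x (List.mem_cons_of_mem _ hx)
        have htake : (t :: ts ++ c :: cs).takeWhile PySem.Chars.isalnum = t :: ts := by
          rw [List.takeWhile_append, List.takeWhile_eq_self_iff.mpr htok]
          simp [List.takeWhile, h]
        have hdrop : (t :: ts ++ c :: cs).dropWhile PySem.Chars.isalnum = c :: cs := by
          rw [List.dropWhile_append]
          simp [List.dropWhile, htok t (by simp), List.dropWhile_eq_nil_iff.mpr hts, h]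
        have hsplit : splitAlnum (t :: ts ++ c :: cs) = (t :: ts) :: splitAlnum (c :: cs) := by
          rw [show ((t :: ts) ++ c :: cs) = t :: (ts ++ c :: cs) by simp, splitAlnum]
          simp only [htok t (by simp), if_pos]
          rw [show t :: (ts ++ c :: cs) = (t :: ts ++ c :: cs) by simp, htake, hdrop]
        rw [hsplit, show splitAlnum (c :: cs) = splitAlnum cs by rw [splitAlnum]; simp [h]]
        simp [scanA, h, ih [] (by simp)]

-- ===== VERDICT (by name: the statement is the Claim_ definition above) =====
theorem title_tokens_py_spec : Claim_equal_title_tokens_py := by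
  intro value _
  show _ = _
  unfold title_tokens_py title_tokens_py_alt
  rw [foldl_aStep _ [] [], scanA_eq _ [] (by simp)]
  simp
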